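-- pv_equiv track=rewrite | github.com/jramaswami/Binary_Search_Python | making_pairwise_adjacent_sums_small.py | solve
-- ===== SOURCE A (Python) =====
-- def solve(nums, k):
--     MOD = pow(10, 9) + 7
--     soln = 0
--     nums0 = list(nums)
--     for i, _ in enumerate(nums[:-1]):
--         while nums[i] + nums[i+1] > k:
--             delta = nums[i] + nums[i+1] - k
--             if nums[i+1] > 0:
--                 delta_actual = min(nums[i+1], delta)
--                 soln = (soln + delta_actual) % MOD
--                 nums[i+1] -= delta_actual
--             else:
--                 delta_actual = min(nums[i], delta)
--                 soln = (soln + delta_actual) % MOD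
--                 nums[i] -= delta_actual
--
--     return soln % MOD
-- ===== SOURCE B (Python) =====
-- def solve(nums, k):
--     # simpler: per adjacent pair, direct arithmetic replaces A's inner while loop.
--     # like A, mutates nums in place (return value is what's proved equivalent).
--     MOD = 10**9 + 7
--     soln = 0
--     for i in range(len(nums) - 1):
--         need = nums[i] + nums[i+1] - k
--         if need > 0:
--             soln = (soln + need) % MOD
--             take = min(nums[i+1], need) if nums[i+1] > 0 else 0
--             nums[i+1] -= take
--             nums[i] -= need - take
--     return soln % MOD
-- ===== Notes on version B (the rewrite author's own statement) =====
-- stated objective: simpler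
-- what changed: A's inner while loop (repeatedly clamped subtraction per pair) is replaced by direct per-pair arithmetic: need = nums[i]+nums[i+1]-k added once, with one clamped update of the pair.
-- outside the precondition, e.g. on solve([0, 1], -1): A does not finish within the time limit, B returns 2; on solve([-5, -5], -1): A returns 0, B returns 0
import Mathlib
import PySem

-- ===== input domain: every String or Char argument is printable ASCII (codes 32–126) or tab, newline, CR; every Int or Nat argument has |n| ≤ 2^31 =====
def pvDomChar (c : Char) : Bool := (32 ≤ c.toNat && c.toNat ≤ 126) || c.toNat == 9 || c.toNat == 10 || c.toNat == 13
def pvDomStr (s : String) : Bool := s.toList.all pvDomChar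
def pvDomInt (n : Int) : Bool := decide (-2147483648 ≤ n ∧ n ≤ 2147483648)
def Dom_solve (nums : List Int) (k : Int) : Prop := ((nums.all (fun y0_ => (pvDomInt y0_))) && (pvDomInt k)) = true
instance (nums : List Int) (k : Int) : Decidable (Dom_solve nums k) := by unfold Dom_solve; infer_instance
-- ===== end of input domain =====

-- B replaces A's inner while loop by direct per-pair arithmetic (objective: simpler).
-- Both A and B mutate the Python argument list in place; the equivalence proved is about the RETURN value.

-- ===== PORT A =====
-- A's inner while loop over the mutable pair state (nums[i], nums[i+1], soln).
-- Fuel guard only makes it total: under Pre_solve (0 ≤ k) the Python loop runs at most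
-- twice per pair (proved in solveWhile_eq below), so fuel 2 never changes the result there.
def solveWhile (k : Int) : Nat → Int → Int → Int → Int × Int × Int
  | 0, a, b, soln => (a, b, soln)
  | Nat.succ f, a, b, soln =>
    if a + b > k then
      let delta := a + b - k
      if b > 0 then
        let d := min b delta
        solveWhile k f a (b - d) (PySem.Int.mod (soln + d) 1000000007)
      else
        let d := min a delta
        solveWhile k f (a - d) b (PySem.Int.mod (soln + d) 1000000007)
    else (a, b, soln)

-- the for-loop over i: carries nums[i] (a) and the tail; the updated nums[i] is never read again
def solveLoopA (k : Int) : Int → List Int → Int → Int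
  | _, [], soln => soln
  | a, b :: tl, soln =>
    let r := solveWhile k 2 a b soln
    solveLoopA k r.2.1 tl r.2.2

def solve (nums : List Int) (k : Int) : Int :=
  match nums with
  | [] => PySem.Int.mod 0 1000000007
  | a :: tl => PySem.Int.mod (solveLoopA k a tl 0) 1000000007

-- ===== PORT B =====
def solveLoopB (k : Int) : Int → List Int → Int → Int
  | _, [], soln => soln
  | a, b :: tl, soln =>
    let need := a + b - k
    if need > 0 then
      let take := if b > 0 then min b need else 0
      -- nums[i] -= need - take is dead for the return value; nums[i+1] becomes b - take
      solveLoopB k (b - take) tl (PySem.Int.mod (soln + need) 1000000007)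
    else
      solveLoopB k b tl soln

def solve_alt (nums : List Int) (k : Int) : Int :=
  match nums with
  | [] => PySem.Int.mod 0 1000000007
  | a :: tl => PySem.Int.mod (solveLoopB k a tl 0) 1000000007

-- ===== PRECONDITION & SPEC =====
-- Pre_ requires 0 ≤ k, the problem's natural domain: for k < 0 A's inner while loop can stop
-- making progress and loop forever (e.g. solve([0, 1], -1) diverges while B returns 2); on the
-- excluded k < 0 inputs where A does terminate, B returns the same value.
def Pre_solve (nums : List Int) (k : Int) : Prop := 0 ≤ k
instance (nums : List Int) (k : Int) : Decidable (Pre_solve nums k) := by unfold Pre_solve; infer_instance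
def pvWitness_solve : List Int × Int := ([1, 5, 2], 3)
def Spec_solve (nums : List Int) (k : Int) (out : Int) : Prop := out = solve_alt nums k
instance (nums : List Int) (k : Int) (out : Int) : Decidable (Spec_solve nums k out) := by unfold Spec_solve; infer_instance

-- ===== CLAIM (what is proved, stated in full; the proofs are below) =====
def Claim_equal_solve : Prop := ∀ (nums : List Int) (k : Int), Dom_solve nums k → Pre_solve nums k → Spec_solve nums k (solve nums k)

-- ===== LEMMAS AND PROOFS =====

theorem mod_chunk (x y : Int) :
    PySem.Int.mod (PySem.Int.mod x 1000000007 + y) 1000000007 =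
      PySem.Int.mod (x + y) 1000000007 := by
  simp only [PySem.Int.mod_eq_emod_of_pos (show (0:Int) < 1000000007 by norm_num)]
  exact Int.emod_add_emod x 1000000007 y

-- under 0 ≤ k, A's while loop on one pair terminates within 2 iterations and its effect is B's arithmetic
theorem solveWhile_eq (k a b soln : Int) (hk : 0 ≤ k) :
    solveWhile k 2 a b soln =
      if a + b - k > 0 then
        (a - (a + b - k - (if b > 0 then min b (a + b - k) else 0)),
         b - (if b > 0 then min b (a + b - k) else 0),
         PySem.Int.mod (soln + (a + b - k)) 1000000007)
      else (a, b, soln) := by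
  simp only [solveWhile, min_def]
  split_ifs <;>
    first
      | (exfalso; omega)
      | rfl
      | (rw [Prod.mk.injEq, Prod.mk.injEq]
         refine ⟨by omega, by omega, ?_⟩
         first
           | rfl
           | (simp only [mod_chunk]; congr 1 <;> omega)
           | (congr 1 <;> omega))

theorem loop_eq (k : Int) (hk : 0 ≤ k) :
    ∀ (rest : List Int) (a soln : Int), solveLoopA k a rest soln = solveLoopB k a rest soln := by
  intro rest
  induction rest with
  | nil => intro a soln; rfl
  | cons b tl ih =>
    intro a soln
    simp only [solveLoopA, solveLoopB, solveWhile_eq k a b soln hk]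
    by_cases h : a + b - k > 0
    · simp only [if_pos h, ih]
    · simp only [if_neg h, ih]

-- ===== VERDICT (by name: the statement is the Claim_ definition above) =====
theorem solve_spec : Claim_equal_solve := by
  intro nums k _ hk
  unfold Spec_solve
  cases nums with
  | nil => rfl
  | cons a tl =>
    simp only [solve, solve_alt]
    rw [loop_eq k hk]
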